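-- pv_equiv track=rewrite | github.com/globalrx/globalrx | dle/compare/util.py | get_diff_match_tuples
-- ===== SOURCE A (Python) =====
-- def get_diff_match_tuples(text_arr, common_index_list, value):
--     data = []
--     isCommon = False
--     arr = []
--     length = len(text_arr)
--     for i in range(length):
--         if i in common_index_list:
--             if not isCommon:
--                 arr_text = ""
--                 for j in arr:
--                     arr_text += text_arr[j] + " "
--                 data.append((0, arr_text))
--                 isCommon = True
--                 arr = []
--         else:
--             if isCommon:
--                 arr_text = ""
--                 for j in arr:
--                     arr_text += text_arr[j] + " "
--                 data.append((value, arr_text))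
--                 isCommon = False
--                 arr = []
--         arr.append(i)
--
--     arr_text = ""
--     for j in arr:
--         arr_text += text_arr[j] + " "
--     data.append((value if isCommon else 0, arr_text))
--     return data
-- ===== SOURCE B (Python) =====
-- def get_diff_match_tuples(text_arr, common_index_list, value):
--     common = set(common_index_list)
--     n = len(text_arr)
--     runs = []
--     start = 0
--     # emit a run every time membership in `common` flips (or at the end)
--     for i in range(1, n + 1):
--         if i == n or (i in common) != (start in common):
--             label = value if start in common else 0
--             runs.append((label, ''.join(t + ' ' for t in text_arr[start:i])))
--             start = i
--     # the output format always starts with a diff segment: empty when the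
--     # text is empty or begins with a common token
--     if n == 0 or 0 in common:
--         runs.insert(0, (0, ''))
--     return runs
-- ===== Notes on version B (the rewrite author's own statement) =====
-- stated objective: faster
-- what changed: Replaces the emit-previous-run state machine (isCommon flag, index buffer, per-index list membership scan, string += joins) by a single boundary-detection pass over a set of common indices that emits each run directly via slice + ''.join, with one prepend of the leading empty diff segment.
import Mathlib
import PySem

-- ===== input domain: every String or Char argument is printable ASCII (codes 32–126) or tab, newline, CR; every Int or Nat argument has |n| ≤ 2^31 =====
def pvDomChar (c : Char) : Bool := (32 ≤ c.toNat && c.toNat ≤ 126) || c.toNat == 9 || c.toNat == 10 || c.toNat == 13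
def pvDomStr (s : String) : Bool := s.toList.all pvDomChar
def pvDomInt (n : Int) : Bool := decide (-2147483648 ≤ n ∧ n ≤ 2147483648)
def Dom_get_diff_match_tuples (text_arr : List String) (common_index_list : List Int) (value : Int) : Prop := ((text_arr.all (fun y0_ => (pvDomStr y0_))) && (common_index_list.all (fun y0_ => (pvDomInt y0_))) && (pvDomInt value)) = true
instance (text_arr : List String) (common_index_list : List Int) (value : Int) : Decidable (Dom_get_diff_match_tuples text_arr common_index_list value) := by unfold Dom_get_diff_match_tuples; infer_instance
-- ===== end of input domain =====

-- B replaces A's emit-previous-run state machine by a single boundary-detection pass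
-- over a set of common indices, emitting each run directly (objective: faster).

-- ===== PORT A =====
-- the inner "arr_text = ''; for j in arr: arr_text += text_arr[j] + ' '" loop, which A repeats three times
def pvJoinIdx (text_arr : List String) (arr : List Int) : String :=
  arr.foldl (fun s j => s ++ PySem.List.pyGetD text_arr j "" ++ " ") ""
  -- pyGetD with default "": every j in arr comes from range(len(text_arr)), so always in range

-- the body of A's "for i in range(length)" loop
def pvStepA (text_arr : List String) (common_index_list : List Int) (value : Int)
    (st : List (Int × String) × Bool × List Int) (i : Int) :
    List (Int × String) × Bool × List Int :=
  let st' :=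
    if i ∈ common_index_list then
      if st.2.1 = false then (st.1 ++ [((0 : Int), pvJoinIdx text_arr st.2.2)], true, ([] : List Int))
      else st
    else
      if st.2.1 = true then (st.1 ++ [(value, pvJoinIdx text_arr st.2.2)], false, ([] : List Int))
      else st
  (st'.1, st'.2.1, st'.2.2 ++ [i])

def get_diff_match_tuples (text_arr : List String) (common_index_list : List Int) (value : Int) : List (Int × String) :=
  let length : Int := (text_arr.length : Int)
  let st := (PySem.List.pyRange 0 length 1).foldl (pvStepA text_arr common_index_list value) ([], false, [])
  st.1 ++ [((if st.2.1 then value else 0), pvJoinIdx text_arr st.2.2)]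

-- ===== PORT B =====
-- ''.join(t + ' ' for t in ts)
def pvJoinSp (ts : List String) : String := PySem.Str.join "" (ts.map (fun t => t ++ " "))

-- the body of B's "for i in range(1, n + 1)" loop
def pvStepB (common : PySem.Set Int) (value n : Int) (text_arr : List String)
    (st : List (Int × String) × Int) (i : Int) : List (Int × String) × Int :=
  if i = n ∨ decide (i ∈ common) ≠ decide (st.2 ∈ common) then
    (st.1 ++ [((if st.2 ∈ common then value else 0),
               pvJoinSp (PySem.List.slice text_arr (some st.2) (some i)))], i)
  else st

def get_diff_match_tuples_alt (text_arr : List String) (common_index_list : List Int) (value : Int) : List (Int × String) :=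
  let common : PySem.Set Int := PySem.Set.ofList common_index_list
  let n : Int := (text_arr.length : Int)
  let st := (PySem.List.pyRange 1 (n + 1) 1).foldl (pvStepB common value n text_arr) ([], 0)
  if n = 0 ∨ (0 : Int) ∈ common then ((0 : Int), "") :: st.1 else st.1

-- ===== PRECONDITION & SPEC =====
def Spec_get_diff_match_tuples (text_arr : List String) (common_index_list : List Int) (value : Int) (out : List (Int × String)) : Prop := out = get_diff_match_tuples_alt text_arr common_index_list value
instance (text_arr : List String) (common_index_list : List Int) (value : Int) (out : List (Int × String)) : Decidable (Spec_get_diff_match_tuples text_arr common_index_list value out) := by unfold Spec_get_diff_match_tuples; infer_instance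

-- ===== CLAIM (what is proved, stated in full; the proofs are below) =====
def Claim_equal_get_diff_match_tuples : Prop := ∀ (text_arr : List String) (common_index_list : List Int) (value : Int), Dom_get_diff_match_tuples text_arr common_index_list value → Spec_get_diff_match_tuples text_arr common_index_list value (get_diff_match_tuples text_arr common_index_list value)

-- ===== LEMMAS AND PROOFS =====

-- A's final "data.append((value if isCommon else 0, arr_text))"
def pvAfin (text_arr : List String) (value : Int) (st : List (Int × String) × Bool × List Int) : List (Int × String) :=
  st.1 ++ [((if st.2.1 then value else 0), pvJoinIdx text_arr st.2.2)]

theorem pvJoinSp_nil : pvJoinSp [] = "" := by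
  simp [pvJoinSp, PySem.Str.join, PySem.Chars.join_nil]

theorem pvJoinSp_cons (t : String) (ts : List String) :
    pvJoinSp (t :: ts) = t ++ " " ++ pvJoinSp ts := by
  have h : ∀ (x : List Char) (xs : List (List Char)),
      PySem.Chars.join [] (x :: xs) = x ++ PySem.Chars.join [] xs := by
    intro x xs
    cases xs with
    | nil => simp [PySem.Chars.join_singleton, PySem.Chars.join_nil]
    | cons y ys => simpa using PySem.Chars.join_cons_cons [] x y ys
  simp only [pvJoinSp, PySem.Str.join, List.map_cons]
  rw [show ("" : String).toList = [] from rfl, h, String.ofList_append, String.ofList_toList]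

theorem pvFold_join (ts : List String) (acc : String) :
    ts.foldl (fun a t => a ++ t ++ " ") acc = acc ++ pvJoinSp ts := by
  induction ts generalizing acc with
  | nil => simp [pvJoinSp_nil]
  | cons t ts ih =>
    rw [List.foldl_cons, ih, pvJoinSp_cons]
    simp [String.append_assoc]

theorem pvRangeMap (ta : List String) :
    ∀ (d s : Nat), s + d ≤ ta.length →
      (PySem.List.pyRange (s : Int) ((s : Int) + (d : Int)) 1).map
          (fun j => PySem.List.pyGetD ta j "") =
        (ta.drop s).take d := by
  intro d
  induction d with
  | zero =>
    intro s _
    simp [PySem.List.pyRange_one_eq_nil (le_refl ((s : Int)))]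
  | succ d ih =>
    intro s hs
    have hlt : (s : Int) < (s : Int) + ((d : Nat) + 1 : Nat) := by omega
    rw [PySem.List.pyRange_one_cons hlt, List.map_cons]
    have hslen : s < ta.length := by omega
    have hhead : PySem.List.pyGetD ta (s : Int) "" = ta[s] := by
      rw [PySem.List.pyGetD_natCast, List.getD_eq_getElem ta "" hslen]
    have hcast1 : (s : Int) + 1 = ((s + 1 : Nat) : Int) := by push_cast; ring
    have hcast2 : (s : Int) + ((d : Nat) + 1 : Nat) = ((s + 1 : Nat) : Int) + (d : Int) := by
      push_cast; ring
    rw [hhead, hcast1, hcast2, ih (s + 1) (by omega)]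
    rw [List.drop_eq_getElem_cons hslen, List.take_succ_cons]

theorem pvJoinIdx_eq (ta : List String) (s i : Nat) (h1 : s ≤ i) (h2 : i ≤ ta.length) :
    pvJoinIdx ta (PySem.List.pyRange (s : Int) (i : Int) 1) =
      pvJoinSp (PySem.List.slice ta (some (s : Int)) (some (i : Int))) := by
  have hi : (i : Int) = (s : Int) + ((i - s : Nat) : Int) := by omega
  have hm := pvRangeMap ta (i - s) s (by omega)
  unfold pvJoinIdx
  rw [PySem.List.slice_natCast]
  conv_lhs => rw [hi]
  rw [← List.foldl_map (f := fun j => PySem.List.pyGetD ta j "")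
    (g := fun a t => a ++ t ++ " "), hm, pvFold_join]
  simp

theorem pvStepA_acc (ta : List String) (cl : List Int) (v : Int)
    (st : List (Int × String) × Bool × List Int) (i : Int) :
    pvStepA ta cl v st i =
      (st.1 ++ (pvStepA ta cl v ([], st.2) i).1, (pvStepA ta cl v ([], st.2) i).2) := by
  obtain ⟨d, c, a⟩ := st
  simp only [pvStepA]
  split_ifs <;> simp

theorem pvFoldA_acc (ta : List String) (cl : List Int) (v : Int) (r : List Int) :
    ∀ (d : List (Int × String)) (ca : Bool × List Int),
      r.foldl (pvStepA ta cl v) (d, ca) =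
        (d ++ (r.foldl (pvStepA ta cl v) ([], ca)).1, (r.foldl (pvStepA ta cl v) ([], ca)).2) := by
  induction r with
  | nil => intro d ca; simp
  | cons i r ih =>
    intro d ca
    simp only [List.foldl_cons]
    rw [pvStepA_acc ta cl v (d, ca) i]
    rw [ih (d ++ (pvStepA ta cl v ([], ca) i).1) (pvStepA ta cl v ([], ca) i).2,
        ih (pvStepA ta cl v ([], ca) i).1 (pvStepA ta cl v ([], ca) i).2]
    simp [List.append_assoc]

theorem pvStepB_acc (cm : PySem.Set Int) (v n : Int) (ta : List String)
    (st : List (Int × String) × Int) (i : Int) :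
    pvStepB cm v n ta st i =
      (st.1 ++ (pvStepB cm v n ta ([], st.2) i).1, (pvStepB cm v n ta ([], st.2) i).2) := by
  obtain ⟨d, s⟩ := st
  simp only [pvStepB]
  split_ifs <;> simp

theorem pvFoldB_acc (cm : PySem.Set Int) (v n : Int) (ta : List String) (r : List Int) :
    ∀ (d : List (Int × String)) (s : Int),
      r.foldl (pvStepB cm v n ta) (d, s) =
        (d ++ (r.foldl (pvStepB cm v n ta) ([], s)).1, (r.foldl (pvStepB cm v n ta) ([], s)).2) := by
  induction r with
  | nil => intro d s; simp
  | cons i r ih =>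
    intro d s
    simp only [List.foldl_cons]
    rw [pvStepB_acc cm v n ta (d, s) i]
    rw [ih (d ++ (pvStepB cm v n ta ([], s) i).1) (pvStepB cm v n ta ([], s) i).2,
        ih (pvStepB cm v n ta ([], s) i).1 (pvStepB cm v n ta ([], s) i).2]
    simp [List.append_assoc]

theorem pvAfin_append (ta : List String) (v : Int) (d d' : List (Int × String)) (c : Bool)
    (a : List Int) : pvAfin ta v (d ++ d', c, a) = d ++ pvAfin ta v (d', c, a) := by
  simp [pvAfin, List.append_assoc]

theorem portA_eq (ta : List String) (cl : List Int) (v : Int) :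
    get_diff_match_tuples ta cl v =
      pvAfin ta v ((PySem.List.pyRange 0 (ta.length : Int) 1).foldl
        (pvStepA ta cl v) ([], false, [])) := rfl

theorem portB_eq (ta : List String) (cl : List Int) (v : Int) :
    get_diff_match_tuples_alt ta cl v =
      (if (ta.length : Int) = 0 ∨ (0 : Int) ∈ PySem.Set.ofList cl then
        ((0 : Int), "") ::
          ((PySem.List.pyRange 1 ((ta.length : Int) + 1) 1).foldl
            (pvStepB (PySem.Set.ofList cl) v (ta.length : Int) ta) ([], 0)).1
      else
        ((PySem.List.pyRange 1 ((ta.length : Int) + 1) 1).foldl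
          (pvStepB (PySem.Set.ofList cl) v (ta.length : Int) ta) ([], 0)).1) := rfl

theorem pvMain (ta : List String) (cl : List Int) (v : Int) :
    ∀ (k s i : Nat), s < i → i ≤ ta.length → ta.length - i = k →
      (∀ j : Nat, s ≤ j → j < i → (decide ((j : Int) ∈ cl)) = decide ((s : Int) ∈ cl)) →
      pvAfin ta v ((PySem.List.pyRange (i : Int) (ta.length : Int) 1).foldl
          (pvStepA ta cl v) ([], decide ((s : Int) ∈ cl), PySem.List.pyRange (s : Int) (i : Int) 1)) =
        ((PySem.List.pyRange (i : Int) ((ta.length : Int) + 1) 1).foldl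
          (pvStepB (PySem.Set.ofList cl) v (ta.length : Int) ta) ([], (s : Int))).1 := by
  intro k
  induction k with
  | zero =>
    intro s i hs hi hk _
    have hN : (ta.length : Int) = (i : Int) := by omega
    rw [hN, PySem.List.pyRange_one_eq_nil (le_refl ((i : Int))),
        PySem.List.pyRange_one_singleton]
    simp only [List.foldl_nil, List.foldl_cons]
    have hcond : ((i : Int) = (i : Int) ∨
        decide ((i : Int) ∈ PySem.Set.ofList cl) ≠ decide (((s : Int)) ∈ PySem.Set.ofList cl)) :=
      Or.inl rfl
    rw [pvStepB, if_pos hcond]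
    simp only [pvAfin, List.nil_append]
    rw [pvJoinIdx_eq ta s i (le_of_lt hs) hi]
    by_cases hm : (s : Int) ∈ cl <;>
      simp [hm, PySem.Set.mem_ofList]
  | succ k ih =>
    intro s i hs hi hk hrun
    have e1 : ((i + 1 : Nat) : Int) = (i : Int) + 1 := by push_cast; ring
    have hiN : (i : Int) < (ta.length : Int) := by omega
    rw [PySem.List.pyRange_one_cons hiN,
        PySem.List.pyRange_one_cons (show (i : Int) < (ta.length : Int) + 1 by omega)]
    simp only [List.foldl_cons]
    by_cases hm : decide ((i : Int) ∈ cl) = decide ((s : Int) ∈ cl)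
    · -- membership unchanged: both loops keep their state
      have hA : pvStepA ta cl v
          ([], decide ((s : Int) ∈ cl), PySem.List.pyRange (s : Int) (i : Int) 1) (i : Int)
          = ([], decide ((s : Int) ∈ cl), PySem.List.pyRange (s : Int) ((i + 1 : Nat) : Int) 1) := by
        rw [e1, PySem.List.pyRange_one_succ_right (show (s : Int) ≤ (i : Int) by omega)]
        by_cases hmi : (i : Int) ∈ cl
        · have hms : (s : Int) ∈ cl := by
            have := hm; rw [decide_eq_decide] at this; exact this.mp hmi
          simp [pvStepA, hmi, hms]
        · have hms : ¬((s : Int) ∈ cl) := by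
            have := hm; rw [decide_eq_decide] at this; exact fun h => hmi (this.mpr h)
          simp [pvStepA, hmi, hms]
      have hB : pvStepB (PySem.Set.ofList cl) v (ta.length : Int) ta ([], (s : Int)) (i : Int)
          = ([], (s : Int)) := by
        have hcond : ¬((i : Int) = (ta.length : Int) ∨
            decide ((i : Int) ∈ PySem.Set.ofList cl) ≠ decide ((s : Int) ∈ PySem.Set.ofList cl)) := by
          push Not
          refine ⟨by omega, ?_⟩
          simpa [decide_eq_decide, PySem.Set.mem_ofList] using
            (decide_eq_decide.mp hm)
        rw [pvStepB, if_neg hcond]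
      rw [hA, hB, show (i : Int) + 1 = ((i + 1 : Nat) : Int) from e1.symm]
      exact ih s (i + 1) (by omega) (by omega) (by omega)
        (fun j hj1 hj2 => by
          rcases Nat.lt_succ_iff_lt_or_eq.mp hj2 with h | h
          · exact hrun j hj1 h
          · subst h; exact hm)
    · -- membership flips: both loops emit the finished run
      have hA : pvStepA ta cl v
          ([], decide ((s : Int) ∈ cl), PySem.List.pyRange (s : Int) (i : Int) 1) (i : Int)
          = ([((if decide ((s : Int) ∈ cl) then v else 0),
              pvJoinIdx ta (PySem.List.pyRange (s : Int) (i : Int) 1))],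
             decide ((i : Int) ∈ cl), [(i : Int)]) := by
        by_cases hmi : (i : Int) ∈ cl
        · have hms : ¬((s : Int) ∈ cl) := by
            intro h; exact hm (by simp [hmi, h])
          simp [pvStepA, hmi, hms]
        · have hms : (s : Int) ∈ cl := by
            by_contra h; exact hm (by simp [hmi, h])
          simp [pvStepA, hmi, hms]
      have hB : pvStepB (PySem.Set.ofList cl) v (ta.length : Int) ta ([], (s : Int)) (i : Int)
          = ([((if (s : Int) ∈ PySem.Set.ofList cl then v else 0),
              pvJoinSp (PySem.List.slice ta (some (s : Int)) (some (i : Int))))], (i : Int)) := by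
        have hcond : ((i : Int) = (ta.length : Int) ∨
            decide ((i : Int) ∈ PySem.Set.ofList cl) ≠ decide ((s : Int) ∈ PySem.Set.ofList cl)) := by
          right
          simpa [decide_eq_decide, PySem.Set.mem_ofList] using
            fun h => hm (decide_eq_decide.mpr h)
        rw [pvStepB, if_pos hcond]
        rfl
      rw [hA, hB]
      rw [pvFoldA_acc ta cl v (PySem.List.pyRange ((i : Int) + 1) (ta.length : Int) 1)
            [((if decide ((s : Int) ∈ cl) then v else 0),
              pvJoinIdx ta (PySem.List.pyRange (s : Int) (i : Int) 1))]
            (decide ((i : Int) ∈ cl), [(i : Int)]),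
          pvFoldB_acc (PySem.Set.ofList cl) v (ta.length : Int) ta
            (PySem.List.pyRange ((i : Int) + 1) ((ta.length : Int) + 1) 1)
            [((if (s : Int) ∈ PySem.Set.ofList cl then v else 0),
              pvJoinSp (PySem.List.slice ta (some (s : Int)) (some (i : Int))))] (i : Int)]
      rw [pvAfin_append]
      simp only [Prod.mk.eta]
      have hhead : ((if decide ((s : Int) ∈ cl) then v else 0),
            pvJoinIdx ta (PySem.List.pyRange (s : Int) (i : Int) 1)) =
          ((if (s : Int) ∈ PySem.Set.ofList cl then v else 0),
            pvJoinSp (PySem.List.slice ta (some (s : Int)) (some (i : Int)))) := by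
        rw [pvJoinIdx_eq ta s i (le_of_lt hs) hi]
        by_cases hms : (s : Int) ∈ cl <;> simp [hms, PySem.Set.mem_ofList]
      have htail := ih i (i + 1) (by omega) (by omega) (by omega)
        (fun j hj1 hj2 => by have : j = i := by omega
                             subst this; rfl)
      rw [show ((i : Int)) = ((i : Nat) : Int) from rfl] at htail
      rw [e1] at htail
      rw [show PySem.List.pyRange (i : Int) ((i : Int) + 1) 1 = [(i : Int)] from
        PySem.List.pyRange_one_singleton (i : Int)] at htail
      rw [hhead, htail]
  -- end pvMain

theorem get_diff_match_tuples_spec : Claim_equal_get_diff_match_tuples := by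
  intro ta cl v _
  unfold Spec_get_diff_match_tuples
  by_cases hta : ta = []
  · subst hta
    simp [get_diff_match_tuples, get_diff_match_tuples_alt, pvJoinIdx,
      PySem.List.pyRange_one_eq_nil (le_refl (0 : Int)),
      PySem.List.pyRange_one_eq_nil (le_refl (1 : Int))]
  · have hlen : 0 < ta.length := List.length_pos_iff.mpr hta
    rw [portA_eq, portB_eq]
    have h0lt : (0 : Int) < (ta.length : Int) := by exact_mod_cast hlen
    rw [PySem.List.pyRange_one_cons h0lt]
    simp only [List.foldl_cons]
    have h0 : pvStepA ta cl v ([], false, []) 0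
        = ((if (0 : Int) ∈ cl then [((0 : Int), "")] else []), decide ((0 : Int) ∈ cl), [(0 : Int)]) := by
      by_cases hm0 : (0 : Int) ∈ cl <;> simp [pvStepA, hm0, pvJoinIdx]
    rw [h0]
    have hsingle : PySem.List.pyRange (0 : Int) 1 1 = [(0 : Int)] := by
      simpa using PySem.List.pyRange_one_singleton (0 : Int)
    rw [show [(0 : Int)] = PySem.List.pyRange (0 : Int) 1 1 from hsingle.symm]
    simp only [zero_add]
    rw [pvFoldA_acc ta cl v (PySem.List.pyRange 1 (ta.length : Int) 1)
          (if (0 : Int) ∈ cl then [((0 : Int), "")] else [])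
          (decide ((0 : Int) ∈ cl), PySem.List.pyRange (0 : Int) 1 1)]
    rw [pvAfin_append]
    simp only [Prod.mk.eta]
    have hmain := pvMain ta cl v (ta.length - 1) 0 1 (by omega) (by omega) (by omega)
      (fun j hj1 hj2 => by have : j = 0 := by omega
                           subst this; rfl)
    simp only [Nat.cast_zero, Nat.cast_one] at hmain
    rw [hmain]
    by_cases hm0 : (0 : Int) ∈ cl <;>
      simp [hm0, PySem.Set.mem_ofList, hta]
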